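-- pv_equiv track=rewrite | github.com/fa-yoshinobu/pytoyopuc-computerlink | toyopuc/client.py | _iter_fr_io_segments
-- ===== SOURCE A (Python) =====
-- _FR_BLOCK_WORDS = 0x8000
--
-- _FR_MAX_INDEX = 0x1FFFFF
--
-- _FR_IO_CHUNK_WORDS = 0x0200
--
-- def _validate_fr_index(index: int) -> int:
--     idx = int(index)
--     if idx < 0 or idx > _FR_MAX_INDEX:
--         raise ValueError('FR index out of range (0x000000-0x1FFFFF)')
--     return idx
--
-- def _iter_fr_segments(start_index: int, word_count: int):
--     index = _validate_fr_index(start_index)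
--     remaining = int(word_count)
--     if remaining < 1:
--         raise ValueError('word_count must be >= 1')
--     while remaining > 0:
--         block_offset = index % _FR_BLOCK_WORDS
--         chunk = min(remaining, _FR_BLOCK_WORDS - block_offset)
--         yield index, chunk
--         index += chunk
--         remaining -= chunk
--
-- def _iter_fr_io_segments(start_index: int, word_count: int, max_chunk_words: int = _FR_IO_CHUNK_WORDS):
--     if int(max_chunk_words) < 1:
--         raise ValueError('max_chunk_words must be >= 1')
--     for block_index, block_words in _iter_fr_segments(start_index, word_count):
--         offset = 0
--         while offset < block_words:
--             chunk = min(block_words - offset, int(max_chunk_words))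
--             yield block_index + offset, chunk
--             offset += chunk
-- ===== SOURCE B (Python) =====
-- _FR_BLOCK_WORDS = 0x8000
-- _FR_MAX_INDEX = 0x1FFFFF
-- _FR_IO_CHUNK_WORDS = 0x0200
--
-- def _validate_fr_index(index: int) -> int:
--     idx = int(index)
--     if idx < 0 or idx > _FR_MAX_INDEX:
--         raise ValueError('FR index out of range (0x000000-0x1FFFFF)')
--     return idx
--
-- def _iter_fr_io_segments(start_index: int, word_count: int, max_chunk_words: int = _FR_IO_CHUNK_WORDS):
--     if int(max_chunk_words) < 1:
--         raise ValueError('max_chunk_words must be >= 1')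
--     index = _validate_fr_index(start_index)
--     remaining = int(word_count)
--     if remaining < 1:
--         raise ValueError('word_count must be >= 1')
--     limit = int(max_chunk_words)
--     while remaining > 0:
--         chunk = min(remaining, _FR_BLOCK_WORDS - index % _FR_BLOCK_WORDS, limit)
--         yield index, chunk
--         index += chunk
--         remaining -= chunk
-- ===== Notes on version B (the rewrite author's own statement) =====
-- stated objective: simpler
-- what changed: Replaced the two nested generators (block splitter _iter_fr_segments plus an inner offset loop) by one flat loop whose chunk is the min of the remaining words, the words left in the current 0x8000 block, and max_chunk_words.
import Mathlib
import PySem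

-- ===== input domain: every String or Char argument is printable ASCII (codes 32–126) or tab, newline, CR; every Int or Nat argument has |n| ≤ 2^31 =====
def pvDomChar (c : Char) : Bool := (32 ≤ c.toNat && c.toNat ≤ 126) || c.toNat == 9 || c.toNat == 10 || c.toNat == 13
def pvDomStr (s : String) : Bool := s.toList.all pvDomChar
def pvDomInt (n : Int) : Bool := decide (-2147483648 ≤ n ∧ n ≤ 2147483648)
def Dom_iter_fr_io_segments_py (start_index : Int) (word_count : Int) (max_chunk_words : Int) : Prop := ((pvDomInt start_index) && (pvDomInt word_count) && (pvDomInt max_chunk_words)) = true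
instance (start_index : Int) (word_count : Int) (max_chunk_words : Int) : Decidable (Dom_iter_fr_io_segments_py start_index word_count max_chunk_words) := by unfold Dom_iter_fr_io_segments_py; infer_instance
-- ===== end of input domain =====

-- B replaces A's two nested generators by one flat loop whose chunk is the min of the
-- remaining words, the words left in the 0x8000-word block, and max_chunk_words (simpler).

-- ===== PORT A =====
-- _FR_BLOCK_WORDS / _FR_MAX_INDEX
def frBlockWords : Int := 0x8000
def frMaxIndex : Int := 0x1FFFFF

-- the while-loop of _iter_fr_segments, with an explicit accumulator for the yielded
-- segments (tail-recursive); each yielded block consumes >= 1 word, so word_count.toNat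
-- fuel is enough on admitted inputs
def frSegs (index remaining : Int) (acc : List (Int × Int)) : Nat → List (Int × Int)
  | 0 => acc.reverse
  | fuel + 1 =>
    if remaining > 0 then
      let block_offset := PySem.Int.mod index frBlockWords
      let chunk := min remaining (frBlockWords - block_offset)
      frSegs (index + chunk) (remaining - chunk) ((index, chunk) :: acc) fuel
    else acc.reverse

-- the inner offset-loop of _iter_fr_io_segments, accumulator style; each chunk consumes
-- >= 1 word, so block_words.toNat fuel is enough on admitted inputs
def frInner (block_index block_words m offset : Int) (acc : List (Int × Int)) : Nat → List (Int × Int)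
  | 0 => acc.reverse
  | fuel + 1 =>
    if offset < block_words then
      let chunk := min (block_words - offset) m
      frInner block_index block_words m (offset + chunk) ((block_index + offset, chunk) :: acc) fuel
    else acc.reverse

def iter_fr_io_segments_py (start_index : Int) (word_count : Int) (max_chunk_words : Int) : List (Int × Int) :=
  if max_chunk_words < 1 then []           -- ValueError, excluded by Pre_
  else if start_index < 0 ∨ start_index > frMaxIndex then []  -- ValueError in _validate_fr_index, excluded by Pre_
  else if word_count < 1 then []           -- ValueError, excluded by Pre_
  else (frSegs start_index word_count [] word_count.toNat).flatMap
        (fun p => frInner p.1 p.2 max_chunk_words 0 [] p.2.toNat)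

-- ===== PORT B =====
-- B's single flat while-loop, accumulator style; each chunk consumes >= 1 word, so
-- word_count.toNat fuel is enough
def flatLoop (index remaining m : Int) (acc : List (Int × Int)) : Nat → List (Int × Int)
  | 0 => acc.reverse
  | fuel + 1 =>
    if remaining > 0 then
      let chunk := min remaining (min (frBlockWords - PySem.Int.mod index frBlockWords) m)
      flatLoop (index + chunk) (remaining - chunk) m ((index, chunk) :: acc) fuel
    else acc.reverse

def iter_fr_io_segments_py_alt (start_index : Int) (word_count : Int) (max_chunk_words : Int) : List (Int × Int) :=
  if max_chunk_words < 1 then []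
  else if start_index < 0 ∨ start_index > frMaxIndex then []
  else if word_count < 1 then []
  else flatLoop start_index word_count max_chunk_words [] word_count.toNat

-- ===== PRECONDITION & SPEC =====
-- A raises ValueError when max_chunk_words < 1, start_index is outside 0..0x1FFFFF, or word_count < 1;
-- exactly those inputs are excluded.
def Pre_iter_fr_io_segments_py (start_index : Int) (word_count : Int) (max_chunk_words : Int) : Prop :=
  1 ≤ max_chunk_words ∧ 0 ≤ start_index ∧ start_index ≤ frMaxIndex ∧ 1 ≤ word_count
instance (start_index : Int) (word_count : Int) (max_chunk_words : Int) : Decidable (Pre_iter_fr_io_segments_py start_index word_count max_chunk_words) := by unfold Pre_iter_fr_io_segments_py; infer_instance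

def pvWitness_iter_fr_io_segments_py : Int × Int × Int := (0x7ffe, 5, 2)

def Spec_iter_fr_io_segments_py (start_index : Int) (word_count : Int) (max_chunk_words : Int) (out : List (Int × Int)) : Prop := out = iter_fr_io_segments_py_alt start_index word_count max_chunk_words
instance (start_index : Int) (word_count : Int) (max_chunk_words : Int) (out : List (Int × Int)) : Decidable (Spec_iter_fr_io_segments_py start_index word_count max_chunk_words out) := by unfold Spec_iter_fr_io_segments_py; infer_instance

-- ===== CLAIM (what is proved, stated in full; the proofs are below) =====
def Claim_equal_iter_fr_io_segments_py : Prop := ∀ (start_index : Int) (word_count : Int) (max_chunk_words : Int), Dom_iter_fr_io_segments_py start_index word_count max_chunk_words → Pre_iter_fr_io_segments_py start_index word_count max_chunk_words → Spec_iter_fr_io_segments_py start_index word_count max_chunk_words (iter_fr_io_segments_py start_index word_count max_chunk_words)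

-- ===== LEMMAS AND PROOFS =====

-- plain (non-accumulator) forms of the three loops, used only by the proofs
def frSegsP (index remaining : Int) : Nat → List (Int × Int)
  | 0 => []
  | fuel + 1 =>
    if remaining > 0 then
      let block_offset := PySem.Int.mod index frBlockWords
      let chunk := min remaining (frBlockWords - block_offset)
      (index, chunk) :: frSegsP (index + chunk) (remaining - chunk) fuel
    else []

def frInnerP (block_index block_words m offset : Int) : Nat → List (Int × Int)
  | 0 => []
  | fuel + 1 =>
    if offset < block_words then
      let chunk := min (block_words - offset) m
      (block_index + offset, chunk) :: frInnerP block_index block_words m (offset + chunk) fuel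
    else []

def flatLoopP (index remaining m : Int) : Nat → List (Int × Int)
  | 0 => []
  | fuel + 1 =>
    if remaining > 0 then
      let chunk := min remaining (min (frBlockWords - PySem.Int.mod index frBlockWords) m)
      (index, chunk) :: flatLoopP (index + chunk) (remaining - chunk) m fuel
    else []

-- each accumulator loop is its plain form prefixed by the reversed accumulator
lemma frSegs_eq (f : Nat) : ∀ (i r : Int) (acc : List (Int × Int)),
    frSegs i r acc f = acc.reverse ++ frSegsP i r f := by
  induction f with
  | zero => intro i r acc; simp [frSegs, frSegsP]
  | succ f ih =>
    intro i r acc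
    by_cases hr : r > 0
    · simp only [frSegs, frSegsP, hr, if_pos, ih, List.reverse_cons, List.append_assoc,
        List.singleton_append]
    · simp [frSegs, frSegsP, hr]

lemma frInner_eq (f : Nat) : ∀ (bi bw m off : Int) (acc : List (Int × Int)),
    frInner bi bw m off acc f = acc.reverse ++ frInnerP bi bw m off f := by
  induction f with
  | zero => intro bi bw m off acc; simp [frInner, frInnerP]
  | succ f ih =>
    intro bi bw m off acc
    by_cases hb : off < bw
    · simp only [frInner, frInnerP, hb, if_pos, ih, List.reverse_cons, List.append_assoc,
        List.singleton_append]
    · simp [frInner, frInnerP, hb]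

lemma flatLoop_eq (f : Nat) : ∀ (j r m : Int) (acc : List (Int × Int)),
    flatLoop j r m acc f = acc.reverse ++ flatLoopP j r m f := by
  induction f with
  | zero => intro j r m acc; simp [flatLoop, flatLoopP]
  | succ f ih =>
    intro j r m acc
    by_cases hr : r > 0
    · simp only [flatLoop, flatLoopP, hr, if_pos, ih, List.reverse_cons, List.append_assoc,
        List.singleton_append]
    · simp [flatLoop, flatLoopP, hr]


lemma frMod_bounds (x : Int) : 0 ≤ PySem.Int.mod x frBlockWords ∧ PySem.Int.mod x frBlockWords < frBlockWords :=
  ⟨PySem.Int.mod_nonneg x (by norm_num [frBlockWords]), PySem.Int.mod_lt x (by norm_num [frBlockWords])⟩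

-- within a block, advancing the index by 0 ≤ off keeps the mod affine
lemma frMod_add (x off : Int) (h0 : 0 ≤ off) (h : PySem.Int.mod x frBlockWords + off < frBlockWords) :
    PySem.Int.mod (x + off) frBlockWords = PySem.Int.mod x frBlockWords + off := by
  have hb : (0:Int) < frBlockWords := by norm_num [frBlockWords]
  have hnn := (frMod_bounds x).1
  have h1 : PySem.Int.mod x frBlockWords = x % frBlockWords := PySem.Int.mod_eq_emod_of_pos hb
  have h2 : PySem.Int.mod (x + off) frBlockWords = (x + off) % frBlockWords := PySem.Int.mod_eq_emod_of_pos hb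
  rw [h1] at h hnn
  rw [h1, h2]
  simp only [frBlockWords] at *
  omega

-- flatLoopP's value does not depend on the fuel once it covers remaining.toNat
lemma flatLoopP_fuel (n : Nat) : ∀ (f : Nat) (j r m : Int), 1 ≤ m → r.toNat ≤ n → r.toNat ≤ f →
    flatLoopP j r m n = flatLoopP j r m f := by
  induction n with
  | zero =>
    intro f j r m hm hn _
    have hr : ¬ r > 0 := by omega
    cases f with
    | zero => rfl
    | succ f => simp [flatLoopP, hr]
  | succ n ih =>
    intro f j r m hm hn hf
    by_cases hr : r > 0
    · have hf1 : ∃ f', f = f' + 1 := by cases f with | zero => omega | succ f => exact ⟨f, rfl⟩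
      obtain ⟨f', rfl⟩ := hf1
      simp only [flatLoopP, hr, if_pos]
      have hmb := frMod_bounds j
      set c := min r (min (frBlockWords - PySem.Int.mod j frBlockWords) m) with hc
      have hc1 : 1 ≤ c := by omega
      have hcr : c ≤ r := by omega
      exact congrArg _ (ih f' _ _ _ hm (by omega) (by omega))
    · cases f with
      | zero => simp [flatLoopP, hr]
      | succ f => simp [flatLoopP, hr]

-- the inner offset-loop of A matches a run of B's flat loop across one block
lemma inner_matches (k : Nat) : ∀ (bi bw off r m : Int) (fB : Nat),
    1 ≤ m → 0 ≤ off → off < bw →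
    bw = min r (frBlockWords - PySem.Int.mod bi frBlockWords) →
    (bw - off).toNat ≤ k → (r - off).toNat ≤ fB →
    frInnerP bi bw m off k ++ flatLoopP (bi + bw) (r - bw) m (r - bw).toNat
      = flatLoopP (bi + off) (r - off) m fB := by
  induction k with
  | zero => intro bi bw off r m fB hm hoff hob hbw hk hfB; exfalso; omega
  | succ k ih =>
    intro bi bw off r m fB hm hoff hob hbw hk hfB
    have hmb := frMod_bounds bi
    have hbwle : bw ≤ frBlockWords - PySem.Int.mod bi frBlockWords := by rw [hbw]; exact min_le_right _ _
    have hbwr : bw ≤ r := by rw [hbw]; exact min_le_left _ _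
    have hf1 : ∃ f', fB = f' + 1 := by cases fB with | zero => omega | succ f => exact ⟨f, rfl⟩
    obtain ⟨f', rfl⟩ := hf1
    have hmod : PySem.Int.mod (bi + off) frBlockWords = PySem.Int.mod bi frBlockWords + off :=
      frMod_add bi off hoff (by omega)
    have hrpos : r - off > 0 := by omega
    simp only [frInnerP, flatLoopP, hob, hrpos, if_pos, hmod]
    set c := min (bw - off) m with hc
    have hchunk : min (r - off) (min (frBlockWords - (PySem.Int.mod bi frBlockWords + off)) m) = c := by
      omega
    rw [hchunk]
    have hc1 : 1 ≤ c := by omega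
    have hcle : c ≤ bw - off := by omega
    by_cases hend : off + c < bw
    · have hrec := ih bi bw (off + c) r m f' hm (by omega) hend hbw (by omega) (by omega)
      rw [show bi + off + c = bi + (off + c) from by ring,
          show r - off - c = r - (off + c) from by ring, ← hrec]
      simp
    · -- block finished: off + c = bw, the inner loop exits
      have heq : off + c = bw := by omega
      have hinner : frInnerP bi bw m (off + c) k = [] := by
        cases k with
        | zero => rfl
        | succ k => simp [frInnerP, heq]
      rw [hinner,
          show bi + off + c = bi + bw from by omega,
          show r - off - c = r - bw from by omega,
          flatLoopP_fuel (r - bw).toNat f' (bi + bw) (r - bw) m hm le_rfl (by omega)]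
      simp

-- main loop correspondence: A's block loop flat-mapped through the inner loop is B's flat loop
lemma main_loop (n : Nat) : ∀ (j r m : Int) (fA fB : Nat),
    1 ≤ m → r.toNat ≤ n → r.toNat ≤ fA → r.toNat ≤ fB →
    (frSegsP j r fA).flatMap (fun p => frInnerP p.1 p.2 m 0 p.2.toNat) = flatLoopP j r m fB := by
  induction n with
  | zero =>
    intro j r m fA fB hm hn _ _
    have hr : ¬ r > 0 := by omega
    have h1 : frSegsP j r fA = [] := by cases fA with | zero => rfl | succ f => simp [frSegsP, hr]
    have h2 : flatLoopP j r m fB = [] := by cases fB with | zero => rfl | succ f => simp [flatLoopP, hr]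
    simp [h1, h2]
  | succ n ih =>
    intro j r m fA fB hm hn hfA hfB
    by_cases hr : r > 0
    · have hA : ∃ f', fA = f' + 1 := by cases fA with | zero => omega | succ f => exact ⟨f, rfl⟩
      obtain ⟨fA', rfl⟩ := hA
      have hmb := frMod_bounds j
      simp only [frSegsP, hr, if_pos, List.flatMap_cons]
      set c := min r (frBlockWords - PySem.Int.mod j frBlockWords) with hc
      have hc1 : 1 ≤ c := by omega
      have hcr : c ≤ r := by omega
      rw [ih (j + c) (r - c) m fA' (r - c).toNat hm (by omega) (by omega) (by omega)]
      have := inner_matches c.toNat j c 0 r m fB hm le_rfl (by omega) hc (by omega) (by omega)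
      simpa using this
    · have h1 : frSegsP j r fA = [] := by cases fA with | zero => rfl | succ f => simp [frSegsP, hr]
      have h2 : flatLoopP j r m fB = [] := by cases fB with | zero => rfl | succ f => simp [flatLoopP, hr]
      simp [h1, h2]

-- ===== VERDICT (by name: the statement is the Claim_ definition above) =====
theorem iter_fr_io_segments_py_spec : Claim_equal_iter_fr_io_segments_py := by
  intro s w m _ hpre
  obtain ⟨hm, hs0, hsmax, hw⟩ := hpre
  unfold Spec_iter_fr_io_segments_py iter_fr_io_segments_py iter_fr_io_segments_py_alt
  have h1 : ¬ m < 1 := by omega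
  have h2 : ¬ (s < 0 ∨ s > frMaxIndex) := by omega
  have h3 : ¬ w < 1 := by omega
  simp only [h1, h2, h3, if_false]
  rw [frSegs_eq, flatLoop_eq]
  have hinner : ∀ p : Int × Int, frInner p.1 p.2 m 0 [] p.2.toNat
      = frInnerP p.1 p.2 m 0 p.2.toNat := by
    intro p; rw [frInner_eq]; simp
  simp only [List.reverse_nil, List.nil_append, hinner]
  exact main_loop w.toNat s w m w.toNat w.toNat hm le_rfl le_rfl le_rfl
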